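-- pv_equiv track=rewrite | github.com/JanneVanpoucke/Examen | Examen_bp_JanneVanpoucke/functies.py | echteDelersGroter
-- ===== SOURCE A (Python) =====
-- def echteDelersGroter(controleGetal):
-- 	echteDelers = []
-- 	teller = 0
-- 	for x in range(1,controleGetal):
-- 		if controleGetal%x==0:
-- 			echteDelers.append(x)
-- 		else:
-- 			teller += 1
-- 	somVanEchteDelers = sum(echteDelers)
-- 	if somVanEchteDelers > controleGetal:
-- 		return True
-- 	else:
-- 		return False
-- ===== SOURCE B (Python) =====
-- def echteDelersGroter(controleGetal):
--     # Sum all divisors of controleGetal by pairing d with controleGetal // d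
--     # for d up to sqrt(controleGetal), then remove controleGetal itself.
--     s = 0
--     d = 1
--     while d * d <= controleGetal:
--         if controleGetal % d == 0:
--             s += d
--             q = controleGetal // d
--             if q != d:
--                 s += q
--         d += 1
--     return s - controleGetal > controleGetal
-- ===== Notes on version B (the rewrite author's own statement) =====
-- stated objective: faster
-- what changed: B enumerates divisors only up to sqrt(n), adding each divisor d together with its cofactor n//d, instead of scanning every x in range(1,n).
import Mathlib
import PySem

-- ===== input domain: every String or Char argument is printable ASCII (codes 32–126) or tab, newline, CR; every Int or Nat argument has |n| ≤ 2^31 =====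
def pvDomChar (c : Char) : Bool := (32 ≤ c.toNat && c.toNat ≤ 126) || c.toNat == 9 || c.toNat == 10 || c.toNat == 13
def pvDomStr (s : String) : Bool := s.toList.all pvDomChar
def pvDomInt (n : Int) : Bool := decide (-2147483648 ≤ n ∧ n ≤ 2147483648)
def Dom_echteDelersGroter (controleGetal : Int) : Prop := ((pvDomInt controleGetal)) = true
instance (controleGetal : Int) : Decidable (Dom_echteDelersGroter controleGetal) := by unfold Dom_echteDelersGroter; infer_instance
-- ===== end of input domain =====

-- B replaces A's scan of every x in range(1, n) by divisor pairing up to sqrt(n)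
-- (each divisor d ≤ sqrt(n) contributes d and n // d); objective: asymptotically faster.

-- ===== PORT A =====
-- state: (echteDelers, teller); teller is dead but carried faithfully
def echteDelersGroter (controleGetal : Int) : Bool :=
  let st := (PySem.List.pyRange 1 controleGetal 1).foldl
    (fun (st : List Int × Int) x =>
      if PySem.Int.mod controleGetal x == 0 then (st.1 ++ [x], st.2) else (st.1, st.2 + 1))
    ([], 0)
  let somVanEchteDelers := st.1.sum
  if somVanEchteDelers > controleGetal then true else false

-- ===== PORT B =====
-- the while loop of Source B; d starts at 1 and only increments, so it is carried as a Nat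
def pvBGo (n : Int) (d : Nat) (s : Int) : Int :=
  if h : (d : Int) * (d : Int) ≤ n then
    pvBGo n (d + 1)
      (if PySem.Int.mod n d == 0 then
        (let q := PySem.Int.floordiv n d
         if q ≠ (d : Int) then s + d + q else s + d)
       else s)
  else s
termination_by n.toNat + 1 - d
decreasing_by
  have hd : (d : Int) ≤ n := by
    rcases Nat.eq_zero_or_pos d with h0 | h1
    · subst h0; simpa using h
    · nlinarith [(by exact_mod_cast h1 : (1 : Int) ≤ (d : Int))]
  omega

def echteDelersGroter_alt (controleGetal : Int) : Bool :=
  decide (pvBGo controleGetal 1 0 - controleGetal > controleGetal)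

-- ===== PRECONDITION & SPEC =====
def Spec_echteDelersGroter (controleGetal : Int) (out : Bool) : Prop := out = echteDelersGroter_alt controleGetal
instance (controleGetal : Int) (out : Bool) : Decidable (Spec_echteDelersGroter controleGetal out) := by unfold Spec_echteDelersGroter; infer_instance

-- ===== CLAIM (what is proved, stated in full; the proofs are below) =====
def Claim_equal_echteDelersGroter : Prop := ∀ (controleGetal : Int), Dom_echteDelersGroter controleGetal → Spec_echteDelersGroter controleGetal (echteDelersGroter controleGetal)

-- ===== LEMMAS AND PROOFS =====

-- A's fold: the first component collects the x with n % x == 0, the sum is additive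
theorem pvFoldA_sum (n : Int) (l : List Int) (acc : List Int × Int) :
    ((l.foldl (fun (st : List Int × Int) x =>
        if PySem.Int.mod n x == 0 then (st.1 ++ [x], st.2) else (st.1, st.2 + 1)) acc).1).sum
      = acc.1.sum + (l.map (fun x => if PySem.Int.mod n x == 0 then x else 0)).sum := by
  induction l generalizing acc with
  | nil => simp
  | cons y t ih =>
    simp only [List.foldl_cons, List.map_cons, List.sum_cons, ih]
    by_cases hy : PySem.Int.mod n y == 0
    · simp [hy]
      ring
    · simp [hy]

theorem pvListRangeSum (h : Nat → Int) (m : Nat) :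
    ((List.range m).map h).sum = ∑ k ∈ Finset.range m, h k := by
  induction m with
  | zero => simp
  | succ m ih => simp [List.range_succ, Finset.sum_range_succ, ih]

-- A's divisor sum, in Nat form
theorem pvA_sum (m : Nat) :
    ((PySem.List.pyRange 1 (m : Int) 1).map
        (fun x => if PySem.Int.mod (m : Int) x == 0 then x else 0)).sum
      = ((∑ x ∈ Finset.Ico 1 m, if x ∣ m then x else 0 : Nat) : Int) := by
  rw [PySem.List.pyRange_one, List.map_map, pvListRangeSum]
  have hm : ((m : Int) - 1).toNat = m - 1 := by omega
  rw [hm, Finset.sum_Ico_eq_sum_range]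
  rw [Nat.cast_sum]
  apply Finset.sum_congr rfl
  intro k hk
  simp only [Function.comp]
  have h1 : (1 : Int) + (k : Int) = ((1 + k : Nat) : Int) := by push_cast; ring
  have hpos : 0 < 1 + k := by omega
  rw [h1, PySem.Int.mod_natCast]
  simp only [beq_iff_eq, Int.natCast_eq_zero, ← Nat.dvd_iff_mod_eq_zero]
  split_ifs with hd <;> simp

-- B's loop: sums paired divisor contributions for d in [d0, sqrt m]
theorem pvBGo_eq (m : Nat) (fuel d : Nat) (hfuel : Nat.sqrt m + 1 - d = fuel) (hd : 1 ≤ d) (s : Int) :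
    pvBGo (m : Int) d s
      = s + ((∑ k ∈ Finset.Ico d (Nat.sqrt m + 1),
          if k ∣ m then k + (if m / k ≠ k then m / k else 0) else 0 : Nat) : Int) := by
  induction fuel generalizing d s with
  | zero =>
    have hns : ¬ d * d ≤ m := by
      intro hc
      have := Nat.le_sqrt.mpr hc
      omega
    have hlt : ¬ ((d : Int) * (d : Int) ≤ (m : Int)) := fun hc => hns (by exact_mod_cast hc)
    rw [pvBGo, dif_neg hlt, Finset.Ico_eq_empty (by omega)]
    simp
  | succ f ih =>
    have hdle : d ≤ Nat.sqrt m := by omega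
    have hdd : d * d ≤ m := Nat.le_sqrt.mp hdle
    rw [pvBGo, dif_pos (by exact_mod_cast hdd)]
    rw [ih (d + 1) (by omega) (by omega)]
    rw [Finset.sum_eq_sum_Ico_succ_bot (show d < Nat.sqrt m + 1 by omega), Nat.cast_add]
    have hstep :
        (if PySem.Int.mod (m : Int) d == 0 then
          (let q := PySem.Int.floordiv (m : Int) d
           if q ≠ (d : Int) then s + d + q else s + d)
         else s)
        = s + ((if d ∣ m then d + (if m / d ≠ d then m / d else 0) else 0 : Nat) : Int) := by
      rw [PySem.Int.mod_natCast, PySem.Int.floordiv_natCast]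
      by_cases hdvd : d ∣ m
      · have hmod : m % d = 0 := Nat.mod_eq_zero_of_dvd hdvd
        by_cases hq : m / d = d
        · simp [hmod, hq, hdvd]
        · have hq' : ((m / d : Nat) : Int) ≠ (d : Int) := fun hc => hq (by exact_mod_cast hc)
          simp only [hmod, hdvd, hq, hq', Nat.cast_zero, beq_self_eq_true, if_true, ne_eq,
            not_false_eq_true]
          push_cast
          ring
      · have hmod : m % d ≠ 0 := fun hc => hdvd (Nat.dvd_of_mod_eq_zero hc)
        have hb : (((m % d : Nat) : Int) == 0) = false := by
          simp only [beq_eq_false_iff_ne, ne_eq, Int.natCast_eq_zero]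
          exact hmod
        simp only [hb, Bool.false_eq_true, if_false, hdvd]
        simp
    rw [hstep]
    ring

-- the pairing identity: divisors up to sqrt m, each with its cofactor, sum to all divisors
theorem pvPairing (m : Nat) (hm : 1 ≤ m) :
    (∑ k ∈ Finset.Ico 1 (Nat.sqrt m + 1),
        if k ∣ m then k + (if m / k ≠ k then m / k else 0) else 0)
      = (∑ x ∈ Finset.Ico 1 m, if x ∣ m then x else 0) + m := by
  have hm0 : m ≠ 0 := by omega
  -- right side: all divisors of m
  have hR : (∑ x ∈ Finset.Ico 1 m, if x ∣ m then x else 0) + m = ∑ x ∈ m.divisors, x := by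
    have h1 : ∑ x ∈ Finset.Ico 1 (m + 1), (if x ∣ m then x else 0)
        = (∑ x ∈ Finset.Ico 1 m, if x ∣ m then x else 0) + m := by
      rw [Finset.sum_Ico_succ_top (by omega)]
      simp
    rw [← h1]
    simp [Nat.divisors, Finset.sum_filter]
  rw [hR]
  -- left side: divisors up to sqrt m, plus their cofactors
  have hSeq : (Finset.Ico 1 (Nat.sqrt m + 1)).filter (fun k => k ∣ m)
      = m.divisors.filter (fun k => k ≤ Nat.sqrt m) := by
    ext a
    simp only [Finset.mem_filter, Finset.mem_Ico, Nat.mem_divisors]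
    constructor
    · rintro ⟨⟨h1, h2⟩, h3⟩
      exact ⟨⟨h3, hm0⟩, by omega⟩
    · rintro ⟨⟨h1, _⟩, h2⟩
      have := Nat.pos_of_dvd_of_pos h1 (by omega)
      exact ⟨⟨by omega, by omega⟩, h1⟩
  have hbij : ∑ k ∈ (m.divisors.filter (fun k => k ≤ Nat.sqrt m)).filter (fun k => m / k ≠ k), m / k
      = ∑ e ∈ m.divisors.filter (fun k => ¬ k ≤ Nat.sqrt m), e := by
    apply Finset.sum_nbij' (i := fun k => m / k) (j := fun e => m / e)
    · intro a ha
      simp only [Finset.mem_filter, Nat.mem_divisors] at ha ⊢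
      obtain ⟨⟨⟨adv, -⟩, hle⟩, hne⟩ := ha
      have ha0 : 0 < a := Nat.pos_of_dvd_of_pos adv (by omega)
      have h1 : a ≤ m / a := (Nat.le_div_iff_mul_le ha0).mpr (Nat.le_sqrt.mp hle)
      have h2 : a < m / a := lt_of_le_of_ne h1 (Ne.symm hne)
      have hcan : a * (m / a) = m := Nat.mul_div_cancel' adv
      refine ⟨⟨Nat.div_dvd_of_dvd adv, hm0⟩, ?_⟩
      intro hc
      have := Nat.le_sqrt.mp hc
      nlinarith
    · intro e he
      simp only [Finset.mem_filter, Nat.mem_divisors] at he ⊢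
      obtain ⟨⟨edv, -⟩, hgt⟩ := he
      have he0 : 0 < e := Nat.pos_of_dvd_of_pos edv (by omega)
      have hsq : m < e * e := by
        have h := Nat.sqrt_lt'.mp (show Nat.sqrt m < e by omega)
        nlinarith
      have hcan : e * (m / e) = m := Nat.mul_div_cancel' edv
      have hde : m / e < e := by nlinarith
      have hle : m / e ≤ Nat.sqrt m := Nat.le_sqrt.mpr (by nlinarith)
      have hdds : m / (m / e) = e := Nat.div_div_self edv hm0
      exact ⟨⟨⟨Nat.div_dvd_of_dvd edv, hm0⟩, hle⟩, by omega⟩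
    · intro a ha
      simp only [Finset.mem_filter, Nat.mem_divisors] at ha
      exact Nat.div_div_self ha.1.1.1 hm0
    · intro e he
      simp only [Finset.mem_filter, Nat.mem_divisors] at he
      exact Nat.div_div_self he.1.1 hm0
    · intro a _
      rfl
  calc ∑ k ∈ Finset.Ico 1 (Nat.sqrt m + 1),
          (if k ∣ m then k + (if m / k ≠ k then m / k else 0) else 0)
      = ∑ k ∈ (Finset.Ico 1 (Nat.sqrt m + 1)).filter (fun k => k ∣ m),
          (k + (if m / k ≠ k then m / k else 0)) := (Finset.sum_filter _ _).symm
    _ = ∑ k ∈ m.divisors.filter (fun k => k ≤ Nat.sqrt m), (k + (if m / k ≠ k then m / k else 0)) := by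
          rw [hSeq]
    _ = ∑ k ∈ m.divisors.filter (fun k => k ≤ Nat.sqrt m), k
          + ∑ k ∈ m.divisors.filter (fun k => k ≤ Nat.sqrt m), (if m / k ≠ k then m / k else 0) :=
          Finset.sum_add_distrib
    _ = ∑ k ∈ m.divisors.filter (fun k => k ≤ Nat.sqrt m), k
          + ∑ k ∈ (m.divisors.filter (fun k => k ≤ Nat.sqrt m)).filter (fun k => m / k ≠ k), m / k := by
          congr 1
          exact (Finset.sum_filter _ _).symm
    _ = ∑ k ∈ m.divisors.filter (fun k => k ≤ Nat.sqrt m), k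
          + ∑ e ∈ m.divisors.filter (fun k => ¬ k ≤ Nat.sqrt m), e := by rw [hbij]
    _ = ∑ x ∈ m.divisors, x := Finset.sum_filter_add_sum_filter_not _ _ _

-- ===== VERDICT (by name: the statement is the Claim_ definition above) =====
theorem pvIteBool (p : Prop) [Decidable p] : (if p then true else false) = decide p := by
  by_cases h : p <;> simp [h]

theorem echteDelersGroter_spec : Claim_equal_echteDelersGroter := by
  intro n _
  unfold Spec_echteDelersGroter echteDelersGroter echteDelersGroter_alt
  dsimp only
  rw [pvIteBool, decide_eq_decide]
  by_cases hn : n ≤ 0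
  · rw [PySem.List.pyRange_one_eq_nil (by omega)]
    rw [pvBGo]
    rw [dif_neg (by push_cast; omega)]
    simp only [List.foldl_nil, List.sum_nil]
    omega
  · obtain ⟨m, rfl⟩ : ∃ m : Nat, n = (m : Int) := ⟨n.toNat, by omega⟩
    have hm : 1 ≤ m := by
      have : 0 < (m : Int) := by omega
      exact_mod_cast this
    rw [pvFoldA_sum, pvA_sum, pvBGo_eq m _ 1 rfl le_rfl, pvPairing m hm]
    simp only [List.sum_nil, zero_add, gt_iff_lt]
    push_cast
    omega
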